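-- pv_equiv track=rewrite | github.com/arthurlvt/uapv-cours | cours/programmation/archives/PYTHON/TPs/TP3/v2.py | toutes_possibilites
-- ===== SOURCE A (Python) =====
-- def toutes_possibilites(n, longueur):
--     possibilites = [[]]
--     for _ in range(longueur):
--         nouvelles = []
--         for comb in possibilites:
--             for val in range(1, n+1):
--                 L = list(comb)
--                 L.append(val)
--                 nouvelles.append(L)
--         possibilites = nouvelles
--     return possibilites
-- ===== SOURCE B (Python) =====
-- def toutes_possibilites(n, longueur):
--     def rec(k):
--         if k <= 0:
--             return [[]]
--         if k == 1:
--             return [[v] for v in range(1, n + 1)]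
--         h = k // 2
--         left = rec(h)
--         right = rec(k - h)
--         return [x + y for x in left for y in right]
--     return rec(longueur)
-- ===== Notes on version B (the rewrite author's own statement) =====
-- stated objective: alternative
-- what changed: Replaces A's imperative triple-nested loop that rebinds an accumulator longueur times with a divide-and-conquer recursion: tuples of length k are the lexicographic-order concatenations of tuples of length k//2 with tuples of length k-k//2.
import Mathlib
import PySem

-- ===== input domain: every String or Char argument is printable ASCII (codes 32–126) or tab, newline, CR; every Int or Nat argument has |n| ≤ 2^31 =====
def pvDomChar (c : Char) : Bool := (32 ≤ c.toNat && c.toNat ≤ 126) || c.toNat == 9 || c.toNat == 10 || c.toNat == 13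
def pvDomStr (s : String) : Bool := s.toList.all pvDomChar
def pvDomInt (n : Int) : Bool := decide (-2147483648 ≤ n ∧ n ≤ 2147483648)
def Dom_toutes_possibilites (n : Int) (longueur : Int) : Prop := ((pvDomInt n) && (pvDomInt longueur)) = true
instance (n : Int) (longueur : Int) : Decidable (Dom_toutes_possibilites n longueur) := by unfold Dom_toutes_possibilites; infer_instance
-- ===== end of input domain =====

-- B replaces A's imperative triple-nested loop (rebinding an accumulator longueur times) with a
-- divide-and-conquer recursion on the length: an alternative decomposition of the same enumeration.

-- ===== PORT A =====
def toutes_possibilites (n : Int) (longueur : Int) : List (List Int) :=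
  (PySem.List.pyRange 0 longueur 1).foldl
    (fun possibilites _ =>
      possibilites.foldl
        (fun nouvelles comb =>
          (PySem.List.pyRange 1 (n + 1) 1).foldl
            (fun nouvelles val => nouvelles ++ [comb ++ [val]]) nouvelles)
        [])
    [[]]

-- ===== PORT B =====
-- rec(k): [[]] for k ≤ 0, the singleton tuples for k = 1, otherwise all concatenations of a
-- length-(k/2) tuple with a length-(k - k/2) tuple, left part outer so lexicographic order is kept
def tpRec (n : Int) : Nat → List (List Int)
  | 0 => [[]]
  | 1 => (PySem.List.pyRange 1 (n + 1) 1).map (fun v => [v])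
  | k + 2 =>
      (tpRec n ((k + 2) / 2)).flatMap (fun x =>
        (tpRec n ((k + 2) - (k + 2) / 2)).map (fun y => x ++ y))
  decreasing_by all_goals omega

def toutes_possibilites_alt (n : Int) (longueur : Int) : List (List Int) :=
  tpRec n longueur.toNat

-- ===== PRECONDITION & SPEC =====
def Spec_toutes_possibilites (n : Int) (longueur : Int) (out : List (List Int)) : Prop := out = toutes_possibilites_alt n longueur
instance (n : Int) (longueur : Int) (out : List (List Int)) : Decidable (Spec_toutes_possibilites n longueur out) := by unfold Spec_toutes_possibilites; infer_instance

-- ===== CLAIM (what is proved, stated in full; the proofs are below) =====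
def Claim_equal_toutes_possibilites : Prop := ∀ (n : Int) (longueur : Int), Dom_toutes_possibilites n longueur → Spec_toutes_possibilites n longueur (toutes_possibilites n longueur)

-- ===== LEMMAS AND PROOFS =====

-- one level of A's outer loop, as a function
def tpStep (n : Int) (p : List (List Int)) : List (List Int) :=
  p.flatMap (fun comb => (PySem.List.pyRange 1 (n + 1) 1).map (fun v => comb ++ [v]))

-- one step of A's outer loop equals tpStep
theorem tp_step_eq (n : Int) (p : List (List Int)) :
    p.foldl
      (fun nouvelles comb =>
        (PySem.List.pyRange 1 (n + 1) 1).foldl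
          (fun nouvelles val => nouvelles ++ [comb ++ [val]]) nouvelles)
      []
    = tpStep n p := by
  have h : ∀ (comb : List Int) (acc : List (List Int)),
      (PySem.List.pyRange 1 (n + 1) 1).foldl
        (fun nouvelles val => nouvelles ++ [comb ++ [val]]) acc
      = acc ++ (PySem.List.pyRange 1 (n + 1) 1).map (fun v => comb ++ [v]) := by
    intro comb acc
    induction (PySem.List.pyRange 1 (n + 1) 1) generalizing acc with
    | nil => simp
    | cons x xs ih => simp [ih]
  calc p.foldl
        (fun nouvelles comb =>
          (PySem.List.pyRange 1 (n + 1) 1).foldl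
            (fun nouvelles val => nouvelles ++ [comb ++ [val]]) nouvelles)
        []
      = p.foldl
          (fun nouvelles comb =>
            nouvelles ++ (PySem.List.pyRange 1 (n + 1) 1).map (fun v => comb ++ [v]))
          [] := by
        apply PySem.List.foldl_congr_mem
        intro acc x _
        exact h x acc
    _ = _ := by
        rw [PySem.List.foldl_append_eq_flatMap]
        simp [tpStep]

-- A's outer fold (whose body ignores the range element) is tpStep iterated length-many times
theorem tp_fold_eq (n : Int) (xs : List Int) (init : List (List Int)) :
    xs.foldl
      (fun possibilites _ =>
        possibilites.foldl
          (fun nouvelles comb =>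
            (PySem.List.pyRange 1 (n + 1) 1).foldl
              (fun nouvelles val => nouvelles ++ [comb ++ [val]]) nouvelles)
          [])
      init
    = (tpStep n)^[xs.length] init := by
  induction xs generalizing init with
  | nil => rfl
  | cons x xs ih =>
      simp only [List.foldl_cons, List.length_cons, Function.iterate_succ_apply]
      rw [ih, tp_step_eq]

-- concatenation homomorphism: length-(a+b) tuples are the pairings of length-a with length-b tuples
theorem tp_hom (n : Int) (a b : Nat) :
    (tpStep n)^[a + b] [[]]
    = ((tpStep n)^[a] [[]]).flatMap (fun x => ((tpStep n)^[b] [[]]).map (fun y => x ++ y)) := by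
  induction b with
  | zero => simp [Function.iterate_zero]
  | succ b ih =>
      have h : a + (b + 1) = (a + b) + 1 := by omega
      rw [h, Function.iterate_succ_apply', ih, Function.iterate_succ_apply']
      simp only [tpStep]
      induction ((tpStep n)^[a] [[]]) with
      | nil => simp
      | cons x xs ihx =>
          simp only [List.flatMap_cons, List.flatMap_append] at *
          rw [ihx]
          congr 1
          induction ((tpStep n)^[b] [[]]) with
          | nil => simp
          | cons y ys ihy =>
              simp only [List.flatMap_cons, List.map_cons, List.map_append, List.flatMap_map] at *
              rw [ihy]
              congr 1
              simp [List.map_map, Function.comp_def]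

-- B's divide-and-conquer recursion computes the same iterate
theorem tpRec_eq_iterate (n : Int) : ∀ k, tpRec n k = (tpStep n)^[k] [[]] := by
  intro k
  induction k using Nat.strong_induction_on with
  | _ k ih =>
      match k with
      | 0 => simp [tpRec]
      | 1 => simp [tpRec, tpStep]
      | k + 2 =>
          have h1 : (k + 2) / 2 < k + 2 := by omega
          have h2 : (k + 2) - (k + 2) / 2 < k + 2 := by omega
          rw [tpRec, ih _ h1, ih _ h2, ← tp_hom]
          congr 1
          omega

-- ===== VERDICT (by name: the statement is the Claim_ definition above) =====
theorem toutes_possibilites_spec : Claim_equal_toutes_possibilites := by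
  intro n longueur _
  unfold Spec_toutes_possibilites toutes_possibilites toutes_possibilites_alt
  rw [tp_fold_eq, PySem.List.length_pyRange_one, tpRec_eq_iterate]
  simp
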